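-- pv_equiv track=rewrite | github.com/jason-allen-oneal/plaguefire | app/screens/reduced_map.py | _aggregate_tiles
-- ===== SOURCE A (Python) =====
-- def _aggregate_tiles(
--
--     game_map: list[list[str]],
--     start_x: int,
--     start_y: int,
--     width: int,
--     height: int,
-- ) -> str:
--     """Collapse a block of tiles into a single representative character."""
--     tiles: list[str] = []
--     for yy in range(start_y, min(start_y + height, len(game_map))):
--         row = game_map[yy]
--         for xx in range(start_x, min(start_x + width, len(row))):
--             tiles.append(row[xx])
--
--     if not tiles:
--         return " "
--
--     priority = [
--         "#",
--         "+",
--         "'",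
--         "<",
--         ">",
--         "%",
--         "~",
--         "6",
--         "5",
--         "4",
--         "3",
--         "2",
--         "1",
--         ".",
--     ]
--
--     for symbol in priority:
--         if symbol in tiles:
--             return symbol
--
--     for tile in tiles:
--         if tile.strip():
--             return tile
--
--     return "."
-- ===== SOURCE B (Python) =====
-- _PRIORITY = ["#", "+", "'", "<", ">", "%", "~", "6", "5", "4", "3", "2", "1", "."]
-- _RANK = {s: i for i, s in enumerate(_PRIORITY)}
--
--
-- def _aggregate_tiles(
--     game_map: list[list[str]],
--     start_x: int,
--     start_y: int,
--     width: int,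
--     height: int,
-- ) -> str:
--     """One pass over the block: track the best priority rank and the first
--     non-whitespace tile, instead of building a tile list and scanning it
--     once per priority symbol."""
--     best = None
--     first_nw = None
--     seen = False
--     for yy in range(start_y, min(start_y + height, len(game_map))):
--         row = game_map[yy]
--         for xx in range(start_x, min(start_x + width, len(row))):
--             tile = row[xx]
--             seen = True
--             rank = _RANK.get(tile)
--             if rank is not None and (best is None or rank < best):
--                 best = rank
--             if first_nw is None and tile.strip():
--                 first_nw = tile
--     if not seen:
--         return " "
--     if best is not None:
--         return _PRIORITY[best]
--     if first_nw is not None: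
--         return first_nw
--     return "."
-- ===== Notes on version B (the rewrite author's own statement) =====
-- stated objective: alternative
-- what changed: Instead of materialising the block's tile list and re-scanning it once per priority symbol (14 membership scans) plus a separate fallback loop, B makes a single pass over the block, keeping the minimum priority rank (via a precomputed symbol-to-rank dict) and the first non-whitespace tile, and assembles the answer from those.
import Mathlib
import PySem

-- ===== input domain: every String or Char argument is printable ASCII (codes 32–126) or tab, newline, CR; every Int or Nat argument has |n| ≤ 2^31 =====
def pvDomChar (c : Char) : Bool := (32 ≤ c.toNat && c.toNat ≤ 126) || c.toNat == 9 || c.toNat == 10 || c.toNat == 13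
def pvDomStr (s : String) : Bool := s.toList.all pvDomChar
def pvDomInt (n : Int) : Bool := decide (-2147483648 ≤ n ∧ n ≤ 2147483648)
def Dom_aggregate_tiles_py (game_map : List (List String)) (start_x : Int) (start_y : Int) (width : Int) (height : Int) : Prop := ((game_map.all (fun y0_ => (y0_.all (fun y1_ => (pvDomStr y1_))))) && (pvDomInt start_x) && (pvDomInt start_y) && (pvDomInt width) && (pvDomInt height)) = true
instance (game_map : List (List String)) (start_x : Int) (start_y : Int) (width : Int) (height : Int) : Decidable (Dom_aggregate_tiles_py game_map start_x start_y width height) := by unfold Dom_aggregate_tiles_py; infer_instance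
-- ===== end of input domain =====

-- B replaces A's tile-list + 14 membership scans + fallback scan by one pass over the
-- block tracking minimum priority rank and first non-whitespace tile (objective: alternative single-pass formulation; not measured faster).

-- ===== PORT A =====
-- helper for A: the two 'return'-on-hit loops of A, as structural recursions
def pvPrioScanA : List String → List String → Option String
  | [], _ => none
  | p :: ps, tiles => if p ∈ tiles then some p else pvPrioScanA ps tiles

def pvFirstNWA : List String → Option String
  | [] => none
  | t :: ts => if PySem.Str.strip t ≠ "" then some t else pvFirstNWA ts

def aggregate_tiles_py (game_map : List (List String)) (start_x : Int) (start_y : Int) (width : Int) (height : Int) : String :=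
  -- tiles accumulation (nested for-loops with tiles.append)
  let tiles : List String :=
    (PySem.List.pyRange start_y (min (start_y + height) (game_map.length : Int)) 1).foldl
      (fun acc yy =>
        match PySem.List.pyGet? game_map yy with
        | none => acc          -- Python raises IndexError here; excluded by Pre_
        | some row =>
          (PySem.List.pyRange start_x (min (start_x + width) (row.length : Int)) 1).foldl
            (fun acc2 xx =>
              match PySem.List.pyGet? row xx with
              | none => acc2   -- Python raises IndexError here; excluded by Pre_
              | some t => acc2 ++ [t])
            acc)
      []
  if tiles = [] then " "
  else
    let priority : List String := ["#", "+", "'", "<", ">", "%", "~", "6", "5", "4", "3", "2", "1", "."]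
    match pvPrioScanA priority tiles with
    | some s => s
    | none =>
      match pvFirstNWA tiles with
      | some t => t
      | none => "."

-- ===== PORT B =====
def pvPriorityB : List String := ["#", "+", "'", "<", ">", "%", "~", "6", "5", "4", "3", "2", "1", "."]

-- _RANK = {s: i for i, s in enumerate(_PRIORITY)}
def pvRankB : PySem.Dict String Int :=
  (PySem.List.enumerate pvPriorityB 0).foldl (fun d p => PySem.Dict.insert d p.2 p.1) PySem.Dict.empty

-- one loop-body step of B over state (best, first_nw, seen)
def pvStepB (s : Option Int × Option String × Bool) (t : String) : Option Int × Option String × Bool :=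
  let best' : Option Int :=
    match PySem.Dict.get? pvRankB t, s.1 with
    | some r, none => some r
    | some r, some m => if r < m then some r else some m
    | none, b => b
  let fnw' : Option String :=
    match s.2.1 with
    | some f => some f
    | none => if PySem.Str.strip t ≠ "" then some t else none
  (best', fnw', true)

def aggregate_tiles_py_alt (game_map : List (List String)) (start_x : Int) (start_y : Int) (width : Int) (height : Int) : String :=
  let st : Option Int × Option String × Bool :=
    (PySem.List.pyRange start_y (min (start_y + height) (game_map.length : Int)) 1).foldl
      (fun s yy =>
        match PySem.List.pyGet? game_map yy with
        | none => s            -- Python raises IndexError here; excluded by Pre_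
        | some row =>
          (PySem.List.pyRange start_x (min (start_x + width) (row.length : Int)) 1).foldl
            (fun s2 xx =>
              match PySem.List.pyGet? row xx with
              | none => s2     -- Python raises IndexError here; excluded by Pre_
              | some t => pvStepB s2 t)
            s)
      (none, none, false)
  if st.2.2 = false then " "
  else
    match st.1 with
    | some r => (PySem.List.pyGet? pvPriorityB r).getD "."   -- rank is always a valid index into pvPriorityB
    | none =>
      match st.2.1 with
      | some t => t
      | none => "."

-- ===== PRECONDITION & SPEC =====
-- Pre_ excludes exactly the inputs on which Python raises IndexError: a negative
-- start_y (resp. start_x) below -len that is actually visited by the loops.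
def Pre_aggregate_tiles_py (game_map : List (List String)) (start_x : Int) (start_y : Int) (width : Int) (height : Int) : Prop :=
  (start_y < min (start_y + height) (game_map.length : Int) → -(game_map.length : Int) ≤ start_y) ∧
  ∀ yy ∈ PySem.List.pyRange start_y (min (start_y + height) (game_map.length : Int)) 1,
    ∀ row ∈ PySem.List.pyGet? game_map yy,
      (start_x < min (start_x + width) (row.length : Int) → -(row.length : Int) ≤ start_x)

instance (game_map : List (List String)) (start_x : Int) (start_y : Int) (width : Int) (height : Int) : Decidable (Pre_aggregate_tiles_py game_map start_x start_y width height) := by unfold Pre_aggregate_tiles_py; infer_instance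

def pvWitness_aggregate_tiles_py : List (List String) × Int × Int × Int × Int :=
  ([["#", "."], [" ", "@"]], 0, 0, 2, 2)

def Spec_aggregate_tiles_py (game_map : List (List String)) (start_x : Int) (start_y : Int) (width : Int) (height : Int) (out : String) : Prop := out = aggregate_tiles_py_alt game_map start_x start_y width height
instance (game_map : List (List String)) (start_x : Int) (start_y : Int) (width : Int) (height : Int) (out : String) : Decidable (Spec_aggregate_tiles_py game_map start_x start_y width height out) := by unfold Spec_aggregate_tiles_py; infer_instance

-- ===== CLAIM (what is proved, stated in full; the proofs are below) =====
def Claim_equal_aggregate_tiles_py : Prop := ∀ (game_map : List (List String)) (start_x : Int) (start_y : Int) (width : Int) (height : Int), Dom_aggregate_tiles_py game_map start_x start_y width height → Pre_aggregate_tiles_py game_map start_x start_y width height → Spec_aggregate_tiles_py game_map start_x start_y width height (aggregate_tiles_py game_map start_x start_y width height)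

-- ===== LEMMAS AND PROOFS =====

-- first index of t in a priority list (proof-side characterisation of pvRankB)
def pvIdx? : List String → String → Option Int
  | [], _ => none
  | p :: ps, t => if t = p then some 0 else (pvIdx? ps t).map (· + 1)

theorem pvWitness_ok :
    Dom_aggregate_tiles_py pvWitness_aggregate_tiles_py.1 pvWitness_aggregate_tiles_py.2.1
      pvWitness_aggregate_tiles_py.2.2.1 pvWitness_aggregate_tiles_py.2.2.2.1 pvWitness_aggregate_tiles_py.2.2.2.2 ∧
    Pre_aggregate_tiles_py pvWitness_aggregate_tiles_py.1 pvWitness_aggregate_tiles_py.2.1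
      pvWitness_aggregate_tiles_py.2.2.1 pvWitness_aggregate_tiles_py.2.2.2.1 pvWitness_aggregate_tiles_py.2.2.2.2 := by
  decide

theorem pvRankB_val : pvRankB = PySem.Dict.mk [("#",0),("+",1),("'",2),("<",3),(">",4),("%",5),("~",6),("6",7),("5",8),("4",9),("3",10),("2",11),("1",12),(".",13)] := rfl

theorem pvRankB_get (t : String) : pvRankB.get? t = pvIdx? pvPriorityB t := by
  rw [pvRankB_val]
  by_cases h1 : t = "#"
  · subst h1; rfl
  by_cases h2 : t = "+"
  · subst h2; rfl
  by_cases h3 : t = "'"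
  · subst h3; rfl
  by_cases h4 : t = "<"
  · subst h4; rfl
  by_cases h5 : t = ">"
  · subst h5; rfl
  by_cases h6 : t = "%"
  · subst h6; rfl
  by_cases h7 : t = "~"
  · subst h7; rfl
  by_cases h8 : t = "6"
  · subst h8; rfl
  by_cases h9 : t = "5"
  · subst h9; rfl
  by_cases h10 : t = "4"
  · subst h10; rfl
  by_cases h11 : t = "3"
  · subst h11; rfl
  by_cases h12 : t = "2"
  · subst h12; rfl
  by_cases h13 : t = "1"
  · subst h13; rfl
  by_cases h14 : t = "."
  · subst h14; rfl
  simp only [pvPriorityB, pvIdx?]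
  rw [PySem.Dict.get?_mk_cons, if_neg (by simp only [beq_iff_eq]; exact fun he => h1 he.symm), if_neg h1]
  rw [PySem.Dict.get?_mk_cons, if_neg (by simp only [beq_iff_eq]; exact fun he => h2 he.symm), if_neg h2]
  rw [PySem.Dict.get?_mk_cons, if_neg (by simp only [beq_iff_eq]; exact fun he => h3 he.symm), if_neg h3]
  rw [PySem.Dict.get?_mk_cons, if_neg (by simp only [beq_iff_eq]; exact fun he => h4 he.symm), if_neg h4]
  rw [PySem.Dict.get?_mk_cons, if_neg (by simp only [beq_iff_eq]; exact fun he => h5 he.symm), if_neg h5]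
  rw [PySem.Dict.get?_mk_cons, if_neg (by simp only [beq_iff_eq]; exact fun he => h6 he.symm), if_neg h6]
  rw [PySem.Dict.get?_mk_cons, if_neg (by simp only [beq_iff_eq]; exact fun he => h7 he.symm), if_neg h7]
  rw [PySem.Dict.get?_mk_cons, if_neg (by simp only [beq_iff_eq]; exact fun he => h8 he.symm), if_neg h8]
  rw [PySem.Dict.get?_mk_cons, if_neg (by simp only [beq_iff_eq]; exact fun he => h9 he.symm), if_neg h9]
  rw [PySem.Dict.get?_mk_cons, if_neg (by simp only [beq_iff_eq]; exact fun he => h10 he.symm), if_neg h10]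
  rw [PySem.Dict.get?_mk_cons, if_neg (by simp only [beq_iff_eq]; exact fun he => h11 he.symm), if_neg h11]
  rw [PySem.Dict.get?_mk_cons, if_neg (by simp only [beq_iff_eq]; exact fun he => h12 he.symm), if_neg h12]
  rw [PySem.Dict.get?_mk_cons, if_neg (by simp only [beq_iff_eq]; exact fun he => h13 he.symm), if_neg h13]
  rw [PySem.Dict.get?_mk_cons, if_neg (by simp only [beq_iff_eq]; exact fun he => h14 he.symm), if_neg h14]
  simp [PySem.Dict.get?]

theorem pvIdx?_nonneg : ∀ (P : List String) (t : String) (i : Int), pvIdx? P t = some i → 0 ≤ i := by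
  intro P
  induction P with
  | nil => intro t i h; simp [pvIdx?] at h
  | cons p ps ih =>
    intro t i h
    simp only [pvIdx?] at h
    split at h
    · simp at h; omega
    · simp only [Option.map_eq_some_iff] at h
      obtain ⟨j, hj, rfl⟩ := h
      have := ih t j hj; omega

theorem pvIdx?_lt : ∀ (P : List String) (t : String) (i : Int), pvIdx? P t = some i → i < (P.length : Int) := by
  intro P
  induction P with
  | nil => intro t i h; simp [pvIdx?] at h
  | cons p ps ih =>
    intro t i h
    simp only [pvIdx?] at h
    split at h
    · simp at h ⊢; omega
    · simp only [Option.map_eq_some_iff] at h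
      obtain ⟨j, hj, rfl⟩ := h
      have := ih t j hj
      simp; omega

-- a collected-with-append fold is filterMap
theorem pv_fold_append (l : List Int) (f : Int → Option String) (acc : List String) :
    l.foldl (fun a xx => match f xx with | none => a | some t => a ++ [t]) acc
      = acc ++ l.filterMap f := by
  induction l generalizing acc with
  | nil => simp
  | cons x l ih =>
    simp only [List.foldl_cons, List.filterMap_cons]
    cases h : f x <;> simp [ih]

-- a fold with an Option-guarded step is a fold over the filterMap
theorem pv_fold_opt {σ : Type} (g : σ → String → σ) (l : List Int) (f : Int → Option String) (s : σ) :
    l.foldl (fun s2 xx => match f xx with | none => s2 | some t => g s2 t) s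
      = (l.filterMap f).foldl g s := by
  induction l generalizing s with
  | nil => simp
  | cons x l ih =>
    simp only [List.foldl_cons, List.filterMap_cons]
    cases h : f x <;> simp [ih]

-- component lemmas of B's fold state
theorem pvStepB_seen : ∀ (ts : List String) (s : Option Int × Option String × Bool), ts ≠ [] →
    (ts.foldl pvStepB s).2.2 = true := by
  intro ts
  induction ts with
  | nil => simp
  | cons t ts ih =>
    intro s _
    simp only [List.foldl_cons]
    cases hts : ts with
    | nil => simp [pvStepB]
    | cons a b => rw [← hts]; exact ih _ (by simp [hts])

theorem pvStepB_fnw : ∀ (ts : List String) (b : Option Int) (f : Option String) (sn : Bool),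
    (ts.foldl pvStepB (b, f, sn)).2.1
      = (match f with | some x => some x | none => pvFirstNWA ts) := by
  intro ts
  induction ts with
  | nil => intro b f sn; cases f <;> rfl
  | cons t ts ih =>
    intro b f sn
    simp only [List.foldl_cons]
    cases f with
    | some x => simp only [pvStepB]; rw [ih]
    | none =>
      simp only [pvStepB, pvFirstNWA]
      by_cases h : PySem.Str.strip t ≠ ""
      · rw [if_pos h, if_pos h, ih]
      · rw [if_neg h, if_neg h, ih]

theorem pvStepB_best' : ∀ (ts : List String) (b : Option Int) (f : Option String) (sn : Bool),
    (ts.foldl pvStepB (b, f, sn)).1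
      = (ts.filterMap (fun t => PySem.Dict.get? pvRankB t)).foldl
          (fun ob r => match ob with | none => some r | some m => if r < m then some r else some m) b := by
  intro ts
  induction ts with
  | nil => intro b f sn; rfl
  | cons t ts ih =>
    intro b f sn
    simp only [List.foldl_cons, List.filterMap_cons]
    cases hr : PySem.Dict.get? pvRankB t with
    | none => simp only [pvStepB, hr]; rw [ih]
    | some r =>
      simp only [pvStepB, hr, List.foldl_cons]
      cases b <;> rw [ih]

theorem pvStepB_best (ts : List String) (b : Option Int) (f : Option String) (sn : Bool) :
    (ts.foldl pvStepB (b, f, sn)).1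
      = (ts.filterMap (fun t => pvIdx? pvPriorityB t)).foldl
          (fun ob r => match ob with | none => some r | some m => if r < m then some r else some m) b := by
  have h := pvStepB_best' ts b f sn
  simpa only [pvRankB_get] using h

theorem pv_bestfold_min?_aux : ∀ (rs : List Int) (m : Int),
    rs.foldl (fun ob r => match ob with | none => some r | some m => if r < m then some r else some m)
      (some m) = some (rs.foldl min m) := by
  intro rs
  induction rs with
  | nil => intro m; rfl
  | cons r rs ih =>
    intro m
    simp only [List.foldl_cons]
    have h1 : (if r < m then some r else some m) = some (min m r) := by
      split <;> congr 1 <;> omega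
    rw [h1, ih]

theorem pv_bestfold_min? : ∀ (rs : List Int),
    rs.foldl (fun ob r => match ob with | none => some r | some m => if r < m then some r else some m)
      (none : Option Int) = rs.min? := by
  intro rs
  cases rs with
  | nil => rfl
  | cons r rs =>
    rw [List.min?_cons']
    simpa using pv_bestfold_min?_aux rs r

theorem pv_pyGet?_cons_add_one (p : String) (ps : List String) (r : Int) (h : 0 ≤ r) :
    PySem.List.pyGet? (p :: ps) (r + 1) = PySem.List.pyGet? ps r := by
  rw [PySem.List.pyGet?_of_nonneg (xs := p :: ps) (i := r + 1) (by omega),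
      PySem.List.pyGet?_of_nonneg (xs := ps) (i := r) h]
  rw [show (r + 1).toNat = r.toNat + 1 by omega, List.getElem?_cons_succ]

theorem pv_min?_map_add_one : ∀ l : List Int, (l.map (· + 1)).min? = l.min?.map (· + 1) := by
  intro l
  cases l with
  | nil => rfl
  | cons a l =>
    rw [List.map_cons, List.min?_cons', List.min?_cons']
    simp only [Option.map_some]
    congr 1
    induction l generalizing a with
    | nil => rfl
    | cons b l ih =>
      simp only [List.map_cons, List.foldl_cons]
      rw [show min (a+1) (b+1) = (min a b) + 1 by omega, ih]

-- the crux: A's priority scan equals indexing by the minimum rank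
theorem pv_scan_min : ∀ (P ts : List String),
    ((ts.filterMap (pvIdx? P)).min?).bind (fun r => PySem.List.pyGet? P r) = pvPrioScanA P ts := by
  intro P
  induction P with
  | nil => intro ts; simp [pvIdx?, pvPrioScanA]
  | cons p ps ih =>
    intro ts
    simp only [pvPrioScanA]
    by_cases hp : p ∈ ts
    · rw [if_pos hp]
      have h0 : (0:Int) ∈ ts.filterMap (pvIdx? (p::ps)) :=
        List.mem_filterMap.mpr ⟨p, hp, by simp [pvIdx?]⟩
      have hlb : ∀ b ∈ ts.filterMap (pvIdx? (p::ps)), (0:Int) ≤ b := by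
        intro b hb
        obtain ⟨t, _, ht⟩ := List.mem_filterMap.mp hb
        exact pvIdx?_nonneg _ _ _ ht
      rw [show (ts.filterMap (pvIdx? (p::ps))).min? = some 0 from List.min?_eq_some_iff.mpr ⟨h0, hlb⟩]
      simp
    · rw [if_neg hp]
      have hcg : ts.filterMap (pvIdx? (p::ps)) = (ts.filterMap (pvIdx? ps)).map (· + 1) := by
        rw [List.map_filterMap]
        apply List.filterMap_congr
        intro t htm
        have hne : ¬ t = p := fun he => hp (he ▸ htm)
        simp [pvIdx?, hne]
      rw [hcg, pv_min?_map_add_one, ← ih ts]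
      cases hm : (ts.filterMap (pvIdx? ps)).min? with
      | none => rfl
      | some r =>
        have hrmem := (List.min?_eq_some_iff.mp hm).1
        obtain ⟨t, _, ht⟩ := List.mem_filterMap.mp hrmem
        have hr0 : 0 ≤ r := pvIdx?_nonneg _ _ _ ht
        simp only [Option.map_some, Option.bind_some]
        exact pv_pyGet?_cons_add_one p ps r hr0

-- ===== VERDICT (by name: the statement is the Claim_ definition above) =====
theorem aggregate_tiles_py_spec : Claim_equal_aggregate_tiles_py := by
  unfold Claim_equal_aggregate_tiles_py
  intro gm sx sy w h _ _
  unfold Spec_aggregate_tiles_py aggregate_tiles_py aggregate_tiles_py_alt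
  simp only []
  set g : Int → List String := fun yy => (match PySem.List.pyGet? gm yy with
    | none => []
    | some row => (PySem.List.pyRange sx (min (sx + w) (row.length : Int)) 1).filterMap
        (fun xx => PySem.List.pyGet? row xx)) with hgdef
  have hA : ∀ (l : List Int) (acc : List String),
      l.foldl (fun acc yy => match PySem.List.pyGet? gm yy with
        | none => acc
        | some row => (PySem.List.pyRange sx (min (sx + w) (row.length : Int)) 1).foldl
            (fun acc2 xx => match PySem.List.pyGet? row xx with | none => acc2 | some t => acc2 ++ [t]) acc) acc
      = acc ++ l.flatMap g := by
    intro l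
    induction l with
    | nil => intro acc; simp
    | cons yy l ih =>
      intro acc
      simp only [List.foldl_cons, List.flatMap_cons]
      cases hrow : PySem.List.pyGet? gm yy with
      | none => dsimp only; rw [ih]; simp [hgdef, hrow]
      | some row => dsimp only; rw [pv_fold_append, ih]; simp [hgdef, hrow]
  have hB : ∀ (l : List Int) (s : Option Int × Option String × Bool),
      l.foldl (fun s yy => match PySem.List.pyGet? gm yy with
        | none => s
        | some row => (PySem.List.pyRange sx (min (sx + w) (row.length : Int)) 1).foldl
            (fun s2 xx => match PySem.List.pyGet? row xx with | none => s2 | some t => pvStepB s2 t) s) s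
      = (l.flatMap g).foldl pvStepB s := by
    intro l
    induction l with
    | nil => intro s; simp
    | cons yy l ih =>
      intro s
      simp only [List.foldl_cons, List.flatMap_cons, List.foldl_append]
      cases hrow : PySem.List.pyGet? gm yy with
      | none => dsimp only; rw [ih]; simp [hgdef, hrow]
      | some row => dsimp only; rw [pv_fold_opt, ih]; simp [hgdef, hrow]
  rw [hA, hB]
  simp only [List.nil_append]
  set ts : List String := (PySem.List.pyRange sy (min (sy + h) (gm.length : Int)) 1).flatMap g with htsdef
  rcases eq_or_ne ts [] with hts | hts
  · rw [hts]; rfl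
  · rw [if_neg hts]
    have hseen := pvStepB_seen ts (none, none, false) hts
    rw [if_neg (by simp [hseen])]
    have hbest : (ts.foldl pvStepB (none, none, false)).1
        = (ts.filterMap (fun t => pvIdx? pvPriorityB t)).min? := by
      rw [pvStepB_best, pv_bestfold_min?]
    have hfnw := pvStepB_fnw ts none none false
    rw [show (["#", "+", "'", "<", ">", "%", "~", "6", "5", "4", "3", "2", "1", "."] : List String) = pvPriorityB from rfl]
    rw [← pv_scan_min pvPriorityB ts, hbest, hfnw]
    cases hm : (ts.filterMap (fun t => pvIdx? pvPriorityB t)).min? with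
    | none => rfl
    | some r =>
      have hrmem := (List.min?_eq_some_iff.mp hm).1
      obtain ⟨t, _, ht⟩ := List.mem_filterMap.mp hrmem
      have h0 := pvIdx?_nonneg _ _ _ ht
      have hlt := pvIdx?_lt _ _ _ ht
      simp only [Option.bind_some]
      rw [PySem.List.pyGet?_eq_some_getElem (xs := pvPriorityB) (i := r) h0 hlt]
      rfl
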